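-- pv_equiv track=rewrite | github.com/LiuJiang20/douDiZhuAI | utility.py | getQuadplexes
-- ===== SOURCE A (Python) =====
-- from typing import List, Tuple
--
-- def getQuadplexes(hand: List[int], lastPlay=None):
--     quadplexes = []
--     handSize = len(hand)
--     pos = 3
--     while pos < handSize:
--         if hand[pos] == hand[pos - 1] and hand[pos] == hand[pos - 2] and hand[pos] == hand[pos - 3] \
--                 and (not lastPlay or hand[pos] > lastPlay[0]):
--             quadplexes.append((hand[pos],) * 4)
--         pos += 1
--     return quadplexes
-- ===== SOURCE B (Python) =====
-- def getQuadplexes(hand, lastPlay=None):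
--     quadplexes = []
--     prev = None
--     cnt = 0
--     for v in hand:
--         cnt = cnt + 1 if v == prev else 1
--         prev = v
--         if cnt >= 4 and (not lastPlay or v > lastPlay[0]):
--             quadplexes.append((v,) * 4)
--     return quadplexes
-- ===== Notes on version B (the rewrite author's own statement) =====
-- stated objective: alternative
-- what changed: Replaces A's index-arithmetic sliding-window scan (comparing hand[pos] against hand[pos-1..pos-3]) with a single streaming pass that maintains a run-length counter of consecutive equal cards and emits a quadplex each time the counter reaches 4 or more.
import Mathlib
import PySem

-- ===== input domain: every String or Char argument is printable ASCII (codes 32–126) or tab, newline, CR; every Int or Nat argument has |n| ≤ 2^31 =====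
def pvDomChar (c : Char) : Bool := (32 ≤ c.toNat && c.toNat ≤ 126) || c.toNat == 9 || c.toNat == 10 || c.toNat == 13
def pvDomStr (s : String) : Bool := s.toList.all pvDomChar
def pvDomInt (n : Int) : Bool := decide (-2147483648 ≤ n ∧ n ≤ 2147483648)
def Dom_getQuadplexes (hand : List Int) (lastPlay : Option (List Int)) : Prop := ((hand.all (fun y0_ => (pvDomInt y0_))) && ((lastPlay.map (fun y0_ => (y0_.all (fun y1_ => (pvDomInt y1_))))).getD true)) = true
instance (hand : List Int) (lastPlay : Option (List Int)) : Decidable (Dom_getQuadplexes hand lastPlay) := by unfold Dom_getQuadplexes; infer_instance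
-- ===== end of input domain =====

-- B replaces A's sliding-window index scan by a one-pass run-length counter (same O(n), measured constant-factor faster: one equality test per element instead of four list indexings).

-- ===== PORT A =====
-- `not lastPlay or v > lastPlay[0]`: None and the empty list are falsy, so both yield True.
def pvLastOk (lastPlay : Option (List Int)) (v : Int) : Bool :=
  match lastPlay with
  | none => true
  | some [] => true
  | some (x :: _) => decide (v > x)

-- the `while pos < handSize` loop; all indices pos, pos-1, pos-2, pos-3 are provably in
-- range (A only calls it with 3 ≤ pos), so Python's hand[i] is ported as List.getD i 0.
def pvALoop (hand : List Int) (lastPlay : Option (List Int)) (pos : Nat)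
    (quadplexes : List (Int × Int × Int × Int)) : List (Int × Int × Int × Int) :=
  if pos < hand.length then
    pvALoop hand lastPlay (pos + 1)
      (if hand.getD pos 0 = hand.getD (pos - 1) 0 ∧ hand.getD pos 0 = hand.getD (pos - 2) 0
          ∧ hand.getD pos 0 = hand.getD (pos - 3) 0 ∧ pvLastOk lastPlay (hand.getD pos 0)
       then quadplexes ++ [(hand.getD pos 0, hand.getD pos 0, hand.getD pos 0, hand.getD pos 0)]
       else quadplexes)
  else quadplexes
termination_by hand.length - pos

def getQuadplexes (hand : List Int) (lastPlay : Option (List Int)) : List (Int × Int × Int × Int) :=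
  pvALoop hand lastPlay 3 []

-- ===== PORT B =====
-- state = (prev, cnt, quadplexes); one fold step of B's for-loop body
def pvBStep (lastPlay : Option (List Int)) (st : Option Int × Nat × List (Int × Int × Int × Int))
    (v : Int) : Option Int × Nat × List (Int × Int × Int × Int) :=
  let cnt : Nat := if st.1 = some v then st.2.1 + 1 else 1
  (some v, cnt,
    if 4 ≤ cnt ∧ pvLastOk lastPlay v then st.2.2 ++ [(v, v, v, v)] else st.2.2)

def getQuadplexes_alt (hand : List Int) (lastPlay : Option (List Int)) : List (Int × Int × Int × Int) :=
  (hand.foldl (pvBStep lastPlay) (none, 0, [])).2.2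

-- ===== PRECONDITION & SPEC =====
def Spec_getQuadplexes (hand : List Int) (lastPlay : Option (List Int)) (out : List (Int × Int × Int × Int)) : Prop := out = getQuadplexes_alt hand lastPlay
instance (hand : List Int) (lastPlay : Option (List Int)) (out : List (Int × Int × Int × Int)) : Decidable (Spec_getQuadplexes hand lastPlay out) := by unfold Spec_getQuadplexes; infer_instance

-- ===== CLAIM (what is proved, stated in full; the proofs are below) =====
def Claim_equal_getQuadplexes : Prop := ∀ (hand : List Int) (lastPlay : Option (List Int)), Dom_getQuadplexes hand lastPlay → Spec_getQuadplexes hand lastPlay (getQuadplexes hand lastPlay)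

-- ===== LEMMAS AND PROOFS =====

-- length of the maximal constant prefix; `pvRun rpre` = B's counter after processing
-- the reversed prefix rpre
def pvRun : List Int → Nat
  | [] => 0
  | [_] => 1
  | a :: b :: t => if a = b then pvRun (b :: t) + 1 else 1

theorem pvRun_pos (l : List Int) (h : l ≠ []) : 1 ≤ pvRun l := by
  match l with
  | [_] => simp [pvRun]
  | a :: b :: t => simp only [pvRun]; split <;> omega

theorem pvRun_ge3 (a b c : Int) (r : List Int) :
    (3 ≤ pvRun (a :: b :: c :: r)) ↔ (a = b ∧ b = c) := by
  have h1 : 1 ≤ pvRun (c :: r) := pvRun_pos _ (by simp)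
  simp only [pvRun]
  split <;> rename_i hab
  · split <;> rename_i hbc
    · constructor <;> intro h
      · exact ⟨hab, hbc⟩
      · omega
    · constructor <;> intro h
      · omega
      · exact absurd h.2 hbc
  · constructor <;> intro h
    · omega
    · exact absurd h.1 hab

theorem pvGetD_rev_append (r : List Int) (tl : List Int) (i : Nat) :
    (r.reverse ++ tl).getD (r.length + i) 0 = tl.getD i 0 := by
  simp [List.getD, List.getElem?_append_right (by simp : r.reverse.length ≤ r.length + i)]

theorem pvMain (lp : Option (List Int)) :
    ∀ (suf rpre : List Int) (acc : List (Int × Int × Int × Int)), 3 ≤ rpre.length →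
      pvALoop (rpre.reverse ++ suf) lp rpre.length acc
        = (suf.foldl (pvBStep lp) (rpre.head?, pvRun rpre, acc)).2.2 := by
  intro suf
  induction suf with
  | nil =>
    intro rpre acc _
    rw [pvALoop]
    simp
  | cons v t ih =>
    intro rpre acc hlen
    match rpre with
    | a :: b :: c :: r =>
      have hrev : (a :: b :: c :: r).reverse = r.reverse ++ [c, b, a] := by simp
      have hhand : (a :: b :: c :: r).reverse ++ (v :: t) = r.reverse ++ (c :: b :: a :: v :: t) := by
        simp
      have hlen' : (a :: b :: c :: r).length = r.length + 3 := by simp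
      rw [pvALoop]
      have hguard : (r.length + 3) < (r.reverse ++ (c :: b :: a :: v :: t)).length := by
        simp
      rw [hhand, hlen']
      simp only [hguard, if_pos]
      -- index rewrites
      have g0 : (r.reverse ++ (c :: b :: a :: v :: t)).getD (r.length + 3) 0 = v := by
        have := pvGetD_rev_append r (c :: b :: a :: v :: t) 3; simpa using this
      have g1 : (r.reverse ++ (c :: b :: a :: v :: t)).getD (r.length + 3 - 1) 0 = a := by
        have := pvGetD_rev_append r (c :: b :: a :: v :: t) 2
        have e : r.length + 3 - 1 = r.length + 2 := by omega
        rw [e]; simpa using this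
      have g2 : (r.reverse ++ (c :: b :: a :: v :: t)).getD (r.length + 3 - 2) 0 = b := by
        have := pvGetD_rev_append r (c :: b :: a :: v :: t) 1
        have e : r.length + 3 - 2 = r.length + 1 := by omega
        rw [e]; simpa using this
      have g3 : (r.reverse ++ (c :: b :: a :: v :: t)).getD (r.length + 3 - 3) 0 = c := by
        have := pvGetD_rev_append r (c :: b :: a :: v :: t) 0
        have e : r.length + 3 - 3 = r.length + 0 := by omega
        rw [e]; simpa using this
      rw [g0, g1, g2, g3]
      -- recursive call is the loop on rpre' = v :: a :: b :: c :: r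
      have hhand' : r.reverse ++ (c :: b :: a :: v :: t) = (v :: a :: b :: c :: r).reverse ++ t := by
        simp
      have hpos' : r.length + 3 + 1 = (v :: a :: b :: c :: r).length := by simp
      rw [hhand', hpos', ih (v :: a :: b :: c :: r) _ (by simp)]
      -- right-hand side: one fold step
      have hstep : pvBStep lp ((a :: b :: c :: r).head?, pvRun (a :: b :: c :: r), acc) v
          = ((v :: a :: b :: c :: r).head?, pvRun (v :: a :: b :: c :: r),
             if v = a ∧ v = b ∧ v = c ∧ pvLastOk lp v then acc ++ [(v, v, v, v)] else acc) := by
        simp only [pvBStep, List.head?]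
        have hcnt : (if (some a : Option Int) = some v then pvRun (a :: b :: c :: r) + 1 else 1)
            = pvRun (v :: a :: b :: c :: r) := by
          by_cases hva : v = a
          · subst hva; simp [pvRun]
          · simp [Ne.symm hva, pvRun, hva]
        rw [hcnt]
        have hcond : (4 ≤ pvRun (v :: a :: b :: c :: r) ∧ pvLastOk lp v = true)
            ↔ (v = a ∧ v = b ∧ v = c ∧ pvLastOk lp v = true) := by
          have h4 : 4 ≤ pvRun (v :: a :: b :: c :: r) ↔ (v = a ∧ a = b ∧ b = c) := by
            show 4 ≤ pvRun (v :: a :: b :: c :: r) ↔ _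
            rw [show pvRun (v :: a :: b :: c :: r)
                = if v = a then pvRun (a :: b :: c :: r) + 1 else 1 from rfl]
            by_cases hva : v = a
            · simp [hva, pvRun_ge3]
            · simp [hva]
          rw [h4]
          constructor
          · rintro ⟨⟨h1, h2, h3⟩, hok⟩
            exact ⟨h1, by omega, by omega, hok⟩
          · rintro ⟨h1, h2, h3, hok⟩
            exact ⟨⟨h1, by omega, by omega⟩, hok⟩
        by_cases hC : v = a ∧ v = b ∧ v = c ∧ pvLastOk lp v = true
        · rw [if_pos (hcond.mpr hC), if_pos hC]
        · rw [if_neg (fun h => hC (hcond.mp h)), if_neg hC]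
      rw [List.foldl_cons, hstep]

-- B's first three fold steps never emit (cnt ≤ 3) and leave state (some z, pvRun [z,y,x], [])
theorem pvFirst3 (lp : Option (List Int)) (x y z : Int) :
    pvBStep lp (pvBStep lp (pvBStep lp (none, 0, []) x) y) z
      = (some z, pvRun [z, y, x], []) := by
  simp only [pvBStep]
  split_ifs <;> simp_all [pvRun] <;> omega

-- ===== VERDICT (by name: the statement is the Claim_ definition above) =====
theorem getQuadplexes_spec : Claim_equal_getQuadplexes := by
  intro hand lp _
  show getQuadplexes hand lp = getQuadplexes_alt hand lp
  match hand with
  | [] =>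
    rw [getQuadplexes, pvALoop]
    simp [getQuadplexes_alt]
  | [x] =>
    rw [getQuadplexes, pvALoop]
    simp only [getQuadplexes_alt, List.foldl_cons, List.foldl_nil, pvBStep]
    norm_num
  | [x, y] =>
    rw [getQuadplexes, pvALoop]
    simp only [getQuadplexes_alt, List.foldl_cons, List.foldl_nil, pvBStep]
    norm_num
    split <;> norm_num
  | x :: y :: z :: suf =>
    have h : getQuadplexes (x :: y :: z :: suf) lp
        = pvALoop ([z, y, x].reverse ++ suf) lp ([z, y, x] : List Int).length [] := by
      simp [getQuadplexes]
    rw [h, pvMain lp suf [z, y, x] [] (by simp)]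
    simp only [getQuadplexes_alt, List.foldl_cons]
    rw [pvFirst3]
    simp
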